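-- pv_equiv track=rewrite | github.com/jacobskm217-arch/discord-schedule-bot | post_schedule.py | split_into_messages
-- ===== SOURCE A (Python) =====
-- SAFE_LIMIT = 1850  # leave slack for headers/part labels
--
-- def split_into_messages(blocks: list[str], header: str) -> list[str]:
--     messages = []
--     current = header.strip() + "\n\n"
--     for b in blocks:
--         if len(current) + len(b) + 1 > SAFE_LIMIT:
--             messages.append(current.rstrip())
--             current = header.strip() + "\n\n" + b + "\n"
--         else:
--             current += b + "\n"
--     if current.strip():
--         messages.append(current.rstrip())
--     return messages
-- ===== SOURCE B (Python) =====
-- SAFE_LIMIT = 1850  # leave slack for headers/part labels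
--
-- def split_into_messages(blocks: list[str], header: str) -> list[str]:
--     h = header.strip()
--     base = len(h) + 2
--     # prefix sums: sums[j] = total rendered length of the first j blocks (each block costs len+1)
--     sums = [0]
--     for b in blocks:
--         sums.append(sums[-1] + len(b) + 1)
--     n = len(blocks)
--
--     def fit(i, lo):
--         # binary search: largest j in [lo, n] with base + sums[j] - sums[i] <= SAFE_LIMIT; lo if none
--         hi = n
--         while lo < hi:
--             mid = (lo + hi + 1) // 2
--             if base + sums[mid] - sums[i] <= SAFE_LIMIT:
--                 lo = mid
--             else:
--                 hi = mid - 1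
--         return lo
--
--     # page boundaries: first page may be empty (fit from 0), later pages take at least one block
--     cuts = [0, fit(0, 0)]
--     while cuts[-1] < n:
--         i = cuts[-1]
--         cuts.append(fit(i, i + 1))
--
--     pages = [(h + "\n\n" + "".join(b + "\n" for b in blocks[i:j])).rstrip()
--              for i, j in zip(cuts, cuts[1:])]
--     if pages[-1] == "":
--         pages.pop()
--     return pages
-- ===== Notes on version B (the rewrite author's own statement) =====
-- stated objective: alternative
-- what changed: A's fused accumulate-and-format loop over blocks is replaced by prefix sums over block lengths plus a binary search (on the prefix-sum array) for each page's cut point, followed by a separate render pass over the cut pairs; only the final all-whitespace page is dropped, matching A's final guard.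
import Mathlib
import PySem

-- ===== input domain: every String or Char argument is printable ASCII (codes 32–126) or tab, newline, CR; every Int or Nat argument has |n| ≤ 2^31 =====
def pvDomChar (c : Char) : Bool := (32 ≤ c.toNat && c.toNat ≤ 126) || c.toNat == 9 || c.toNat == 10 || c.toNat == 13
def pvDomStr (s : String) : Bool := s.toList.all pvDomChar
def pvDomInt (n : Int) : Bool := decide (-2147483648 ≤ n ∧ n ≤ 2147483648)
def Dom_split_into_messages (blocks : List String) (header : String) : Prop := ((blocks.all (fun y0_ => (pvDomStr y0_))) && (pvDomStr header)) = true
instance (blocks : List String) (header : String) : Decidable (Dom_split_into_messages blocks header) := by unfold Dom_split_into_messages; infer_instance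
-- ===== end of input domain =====

-- B replaces A's fused accumulate-and-format loop by prefix sums + binary search for each
-- page's cut point, then a separate render pass over the cut pairs; objective: alternative.

def SAFE_LIMIT : Int := 1850

-- ===== PORT A =====
def pvNN : List Char := ['\n', '\n']

def pvStepA (header : String) (st : List (List Char) × List Char) (b : List Char) :
    List (List Char) × List Char :=
  if (st.2.length : Int) + (b.length : Int) + 1 > SAFE_LIMIT then
    (st.1 ++ [PySem.Chars.rstrip st.2], PySem.Chars.strip header.toList ++ pvNN ++ b ++ ['\n'])
  else
    (st.1, st.2 ++ b ++ ['\n'])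

def split_into_messages (blocks : List String) (header : String) : List String :=
  let st := (blocks.map String.toList).foldl (pvStepA header)
    ([], PySem.Chars.strip header.toList ++ pvNN)
  (if PySem.Chars.strip st.2 ≠ [] then st.1 ++ [PySem.Chars.rstrip st.2] else st.1).map String.ofList

-- ===== PORT B =====
-- inner 'while lo < hi' of fit: binary search on the prefix-sum list
-- (sums indices are provably in range on every call B makes, so pyGetD's default is never used)
def pvFitLoop (sums : List Int) (base i : Int) (lo hi : Int) : Nat → Int
  | 0 => lo
  | fuel + 1 =>
    if lo < hi then
      let mid := PySem.Int.floordiv (lo + hi + 1) 2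
      if base + PySem.List.pyGetD sums mid 0 - PySem.List.pyGetD sums i 0 ≤ SAFE_LIMIT then
        pvFitLoop sums base i mid hi fuel
      else
        pvFitLoop sums base i lo (mid - 1) fuel
    else lo

-- outer 'while cuts[-1] < n' loop appending one cut per page (fuel is a totality guard only)
def pvCutsLoop (sums : List Int) (base n : Int) (cuts : List Int) : Nat → List Int
  | 0 => cuts
  | fuel + 1 =>
    if cuts.getLastD 0 < n then
      pvCutsLoop sums base n
        (cuts ++ [pvFitLoop sums base (cuts.getLastD 0) (cuts.getLastD 0 + 1) n
          ((n - (cuts.getLastD 0 + 1)).toNat + 1)]) fuel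
    else cuts

def split_into_messages_alt (blocks : List String) (header : String) : List String :=
  let h := PySem.Chars.strip header.toList
  let base : Int := (h.length : Int) + 2
  let bl := blocks.map String.toList
  let sums := bl.foldl (fun s b => s ++ [s.getLastD 0 + ((b.length : Int) + 1)]) [(0 : Int)]
  let n : Int := (bl.length : Int)
  let cuts := pvCutsLoop sums base n [0, pvFitLoop sums base 0 0 n (n.toNat + 1)] (bl.length + 1)
  let pages := (cuts.zip cuts.tail).map (fun ij =>
      PySem.Chars.rstrip (h ++ pvNN ++
        ((PySem.List.slice bl (some ij.1) (some ij.2)).map (fun b => b ++ ['\n'])).flatten))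
  (if pages.getLastD [] = [] then pages.dropLast else pages).map String.ofList

-- ===== PRECONDITION & SPEC =====
def Spec_split_into_messages (blocks : List String) (header : String) (out : List String) : Prop := out = split_into_messages_alt blocks header
instance (blocks : List String) (header : String) (out : List String) : Decidable (Spec_split_into_messages blocks header out) := by unfold Spec_split_into_messages; infer_instance

-- ===== CLAIM (what is proved, stated in full; the proofs are below) =====
def Claim_equal_split_into_messages : Prop := ∀ (blocks : List String) (header : String), Dom_split_into_messages blocks header → Spec_split_into_messages blocks header (split_into_messages blocks header)

-- ===== LEMMAS AND PROOFS =====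

-- the loop only moves lo upward
lemma pvFitLoop_ge (sums : List Int) (base i : Int) :
    ∀ (fuel : Nat) (lo hi : Int), lo ≤ pvFitLoop sums base i lo hi fuel := by
  intro fuel
  induction fuel with
  | zero => intro lo hi; simp [pvFitLoop]
  | succ fuel ih =>
    intro lo hi
    simp only [pvFitLoop]
    by_cases h1 : lo < hi
    · rw [if_pos h1]
      have hm : PySem.Int.floordiv (lo + hi + 1) 2 = (lo + hi + 1) / 2 :=
        PySem.Int.floordiv_eq_ediv_of_pos (by omega)
      by_cases h2 : base + PySem.List.pyGetD sums (PySem.Int.floordiv (lo + hi + 1) 2) 0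
          - PySem.List.pyGetD sums i 0 ≤ SAFE_LIMIT
      · rw [if_pos h2]
        have := ih (PySem.Int.floordiv (lo + hi + 1) 2) hi
        omega
      · rw [if_neg h2]
        exact ih lo (PySem.Int.floordiv (lo + hi + 1) 2 - 1)
    · rw [if_neg h1]

-- the loop only ever moves hi downward, not below lo
lemma pvFitLoop_le (sums : List Int) (base i : Int) :
    ∀ (fuel : Nat) (lo hi : Int), lo ≤ hi → pvFitLoop sums base i lo hi fuel ≤ hi := by
  intro fuel
  induction fuel with
  | zero => intro lo hi h; simp [pvFitLoop]; omega
  | succ fuel ih =>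
    intro lo hi h
    simp only [pvFitLoop]
    by_cases h1 : lo < hi
    · rw [if_pos h1]
      have hm : PySem.Int.floordiv (lo + hi + 1) 2 = (lo + hi + 1) / 2 :=
        PySem.Int.floordiv_eq_ediv_of_pos (by omega)
      by_cases h2 : base + PySem.List.pyGetD sums (PySem.Int.floordiv (lo + hi + 1) 2) 0
          - PySem.List.pyGetD sums i 0 ≤ SAFE_LIMIT
      · rw [if_pos h2]
        exact ih (PySem.Int.floordiv (lo + hi + 1) 2) hi (by omega)
      · rw [if_neg h2]
        have := ih lo (PySem.Int.floordiv (lo + hi + 1) 2 - 1) (by omega)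
        omega
    · rw [if_neg h1]
      omega

-- abbreviations used by the proofs (not by the ports)
def pvFlat (g : List (List Char)) : List Char := (g.map (fun b => b ++ ['\n'])).flatten

def pvL (bl : List (List Char)) : List Int := bl.map (fun b => ((b.length : Int) + 1))

def pvS (bl : List (List Char)) (j : Nat) : Int := ((pvL bl).take j).sum

def pvCond (base : Int) (bl : List (List Char)) (i j : Nat) : Bool :=
  base + pvS bl j - pvS bl i ≤ SAFE_LIMIT

-- end index of the page that starts at block i and currently extends to block j (A's greedy rule)
def pvExt (base : Int) (bl : List (List Char)) (i j : Nat) : Nat :=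
  if h : j < bl.length ∧ pvCond base bl i (j + 1) = true then pvExt base bl i (j + 1) else j
termination_by bl.length - j
decreasing_by omega

lemma pvExt_ge (base : Int) (bl : List (List Char)) (i : Nat) :
    ∀ j, j ≤ pvExt base bl i j := by
  intro j
  fun_induction pvExt base bl i j with
  | case1 j h ih => omega
  | case2 j h => omega

def pvRest (base : Int) (bl : List (List Char)) (i : Nat) : List Nat :=
  if h : i < bl.length then
    pvExt base bl i (i + 1) :: pvRest base bl (pvExt base bl i (i + 1))
  else []
termination_by bl.length - i
decreasing_by have := pvExt_ge base bl i (i + 1); omega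

def pvChain (base : Int) (bl : List (List Char)) (e : Nat) : List (Nat × Nat) :=
  if h : e < bl.length then
    (e, pvExt base bl e (e + 1)) :: pvChain base bl (pvExt base bl e (e + 1))
  else []
termination_by bl.length - e
decreasing_by have := pvExt_ge base bl e (e + 1); omega

def pvPagesFrom (base : Int) (bl : List (List Char)) (i j : Nat) : List (Nat × Nat) :=
  if h : j < bl.length then
    (if pvCond base bl i (j + 1) = true then pvPagesFrom base bl i (j + 1)
     else (i, j) :: pvPagesFrom base bl j (j + 1))
  else []
termination_by bl.length - j
decreasing_by all_goals omega

def pvLastStart (base : Int) (bl : List (List Char)) (i j : Nat) : Nat :=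
  if h : j < bl.length then
    (if pvCond base bl i (j + 1) = true then pvLastStart base bl i (j + 1)
     else pvLastStart base bl j (j + 1))
  else i
termination_by bl.length - j
decreasing_by all_goals omega

def pvCur (h : List Char) (bl : List (List Char)) (i j : Nat) : List Char :=
  h ++ pvNN ++ pvFlat ((bl.drop i).take (j - i))

def pvScan (x : Int) : List Int → List Int
  | [] => [x]
  | y :: t => x :: pvScan (x + y) t

-- a string strips to "" iff it rstrips to "" (both say: all whitespace)
lemma pv_strip_nil_iff (s : List Char) :
    PySem.Chars.strip s = [] ↔ PySem.Chars.rstrip s = [] := by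
  simp only [PySem.Chars.strip, PySem.Chars.rstrip, PySem.Chars.lstrip,
    List.reverse_eq_nil_iff, List.dropWhile_eq_nil_iff, List.mem_reverse]
  constructor
  · intro hall x hx
    rcases List.mem_append.mp ((List.takeWhile_append_dropWhile (p := PySem.Chars.isspace) (l := s)) ▸ hx) with h1 | h2
    · exact List.mem_takeWhile_imp h1
    · exact hall x h2
  · intro hall x hx
    exact hall x ((List.dropWhile_sublist _).mem hx)

lemma pvFlat_append (g : List (List Char)) (b : List Char) :
    pvFlat (g ++ [b]) = pvFlat g ++ (b ++ ['\n']) := by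
  simp [pvFlat]

lemma pvFlat_len (g : List (List Char)) :
    ((pvFlat g).length : Int) = (g.map (fun b => ((b.length : Int) + 1))).sum := by
  induction g with
  | nil => simp [pvFlat]
  | cons b g ih => simp [pvFlat] at ih ⊢; omega


lemma pvS_sub (bl : List (List Char)) (i j : Nat) (hij : i ≤ j) (hj : j ≤ bl.length) :
    pvS bl j - pvS bl i = (((bl.drop i).take (j - i)).map (fun b => ((b.length : Int) + 1))).sum := by
  have hsplit : bl.take j = bl.take i ++ (bl.drop i).take (j - i) := by
    rw [← List.take_add]
    congr 1
    omega
  simp only [pvS, pvL, ← List.map_take, hsplit]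
  simp


lemma pvCur_len (h : List Char) (bl : List (List Char)) (i j : Nat)
    (hij : i ≤ j) (hj : j ≤ bl.length) :
    ((pvCur h bl i j).length : Int) = (h.length : Int) + 2 + (pvS bl j - pvS bl i) := by
  rw [pvCur]
  have := pvFlat_len ((bl.drop i).take (j - i))
  have h2 := pvS_sub bl i j hij hj
  simp [pvNN]
  push_cast at this ⊢
  omega


lemma pvS_succ (bl : List (List Char)) (j : Nat) (hj : j < bl.length) :
    pvS bl (j + 1) = pvS bl j + ((bl[j].length : Int) + 1) := by
  simp only [pvS, pvL, ← List.map_take, List.take_succ]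
  simp [hj]


lemma pvCur_snoc (h : List Char) (bl : List (List Char)) (i j : Nat)
    (hij : i ≤ j) (hj : j < bl.length) :
    pvCur h bl i (j + 1) = pvCur h bl i j ++ bl[j] ++ ['\n'] := by
  have hgrp : (bl.drop i).take (j + 1 - i) = (bl.drop i).take (j - i) ++ [bl[j]] := by
    have h1 : j + 1 - i = (j - i) + 1 := by omega
    rw [h1, List.take_succ]
    have h2 : j - i < (bl.drop i).length := by simp; omega
    have h3 : (bl.drop i)[j - i]? = some bl[j] := by
      rw [List.getElem?_eq_getElem h2]
      congr 1
      simp [List.getElem_drop]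
      congr 1
      omega
    rw [h3]
    simp
  simp [pvCur, hgrp, pvFlat_append]


lemma pvCur_single (h : List Char) (bl : List (List Char)) (j : Nat) (hj : j < bl.length) :
    pvCur h bl j (j + 1) = h ++ pvNN ++ bl[j] ++ ['\n'] := by
  have : (bl.drop j).take 1 = [bl[j]] := by
    rw [List.take_one, List.head?_drop, List.getElem?_eq_getElem hj]
    rfl
  simp [pvCur, this, pvFlat]


-- the main A-side loop invariant
lemma foldA_run (header : String) (bl : List (List Char)) :
    ∀ (k j i : Nat) (msgs : List (List Char)), bl.length - j ≤ k → i ≤ j → j ≤ bl.length →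
    (bl.drop j).foldl (pvStepA header) (msgs, pvCur (PySem.Chars.strip header.toList) bl i j)
      = (msgs ++ (pvPagesFrom ((PySem.Chars.strip header.toList).length + 2 : Int) bl i j).map
            (fun p => PySem.Chars.rstrip (pvCur (PySem.Chars.strip header.toList) bl p.1 p.2)),
         pvCur (PySem.Chars.strip header.toList) bl
           (pvLastStart ((PySem.Chars.strip header.toList).length + 2 : Int) bl i j) bl.length) := by
  intro k
  induction k with
  | zero =>
    intro j i msgs hk hij hj
    have hjn : j = bl.length := by omega
    subst hjn
    rw [pvPagesFrom, dif_neg (by omega), pvLastStart, dif_neg (by omega)]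
    simp
  | succ k ih =>
    intro j i msgs hk hij hj
    by_cases hlt : j < bl.length
    · rw [List.drop_eq_getElem_cons hlt, List.foldl_cons]
      have hcnd : (((pvCur (PySem.Chars.strip header.toList) bl i j).length : Int)
            + (bl[j].length : Int) + 1 > SAFE_LIMIT)
          ↔ pvCond ((PySem.Chars.strip header.toList).length + 2 : Int) bl i (j + 1) = false := by
        rw [pvCur_len _ bl i j hij (by omega)]
        have hsucc := pvS_succ bl j hlt
        simp only [pvCond, SAFE_LIMIT, decide_eq_false_iff_not, not_le, gt_iff_lt]
        rw [hsucc]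
        omega
      by_cases hc : pvCond ((PySem.Chars.strip header.toList).length + 2 : Int) bl i (j + 1) = true
      · have hno : ¬ (((pvCur (PySem.Chars.strip header.toList) bl i j).length : Int)
            + (bl[j].length : Int) + 1 > SAFE_LIMIT) := by
          rw [hcnd]
          simp [hc]
        have hP : pvPagesFrom ((PySem.Chars.strip header.toList).length + 2 : Int) bl i j
            = pvPagesFrom ((PySem.Chars.strip header.toList).length + 2 : Int) bl i (j + 1) := by
          rw [pvPagesFrom, dif_pos hlt, if_pos hc]
        have hL : pvLastStart ((PySem.Chars.strip header.toList).length + 2 : Int) bl i j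
            = pvLastStart ((PySem.Chars.strip header.toList).length + 2 : Int) bl i (j + 1) := by
          rw [pvLastStart]
          rw [dif_pos hlt, if_pos hc]
        rw [show pvStepA header (msgs, pvCur (PySem.Chars.strip header.toList) bl i j) bl[j]
            = (msgs, pvCur (PySem.Chars.strip header.toList) bl i (j + 1)) by
          simp only [pvStepA, if_neg hno]
          rw [pvCur_snoc _ bl i j hij hlt]]
        rw [hP, hL]
        exact ih (j + 1) i msgs (by omega) (by omega) (by omega)
      · have hyes : (((pvCur (PySem.Chars.strip header.toList) bl i j).length : Int)
            + (bl[j].length : Int) + 1 > SAFE_LIMIT) := by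
          rw [hcnd]
          simpa using hc
        have hP : pvPagesFrom ((PySem.Chars.strip header.toList).length + 2 : Int) bl i j
            = (i, j) :: pvPagesFrom ((PySem.Chars.strip header.toList).length + 2 : Int) bl j (j + 1) := by
          rw [pvPagesFrom, dif_pos hlt, if_neg hc]
        have hL : pvLastStart ((PySem.Chars.strip header.toList).length + 2 : Int) bl i j
            = pvLastStart ((PySem.Chars.strip header.toList).length + 2 : Int) bl j (j + 1) := by
          rw [pvLastStart]
          rw [dif_pos hlt, if_neg hc]
        rw [show pvStepA header (msgs, pvCur (PySem.Chars.strip header.toList) bl i j) bl[j]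
            = (msgs ++ [PySem.Chars.rstrip (pvCur (PySem.Chars.strip header.toList) bl i j)],
               pvCur (PySem.Chars.strip header.toList) bl j (j + 1)) by
          simp only [pvStepA, if_pos hyes]
          rw [pvCur_single _ bl j hlt]]
        rw [hP, hL]
        rw [ih (j + 1) j (msgs ++ [PySem.Chars.rstrip (pvCur (PySem.Chars.strip header.toList) bl i j)])
          (by omega) (by omega) (by omega)]
        simp
    · have hjn : j = bl.length := by omega
      subst hjn
      rw [pvPagesFrom, dif_neg (by omega), pvLastStart, dif_neg (by omega)]
      simp

-- B-side: the fold building sums is pvScan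
lemma pv_foldl_scan (L : List Int) :
    ∀ (acc : List Int) (x : Int),
      L.foldl (fun s y => s ++ [s.getLastD 0 + y]) (acc ++ [x]) = acc ++ pvScan x L := by
  induction L with
  | nil => simp [pvScan]
  | cons y t ih =>
    intro acc x
    simp only [List.foldl_cons, pvScan]
    have h1 : (acc ++ [x]).getLastD 0 = x := by simp
    rw [h1]
    have h2 : acc ++ [x] ++ [x + y] = (acc ++ [x]) ++ [x + y] := by simp
    rw [h2, ih (acc ++ [x]) (x + y)]
    simp


lemma pvScan_len (x : Int) (L : List Int) : (pvScan x L).length = L.length + 1 := by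
  induction L generalizing x with
  | nil => simp [pvScan]
  | cons y t ih => simp [pvScan, ih]


lemma pvScan_getD (L : List Int) :
    ∀ (x : Int) (j : Nat), j ≤ L.length → (pvScan x L).getD j 0 = x + (L.take j).sum := by
  induction L with
  | nil =>
    intro x j hj
    have hz : j = 0 := by simpa using hj
    subst hz
    simp [pvScan]
  | cons y t ih =>
    intro x j hj
    cases j with
    | zero => simp [pvScan]
    | succ j =>
      simp only [pvScan, List.getD_cons_succ, List.take_succ_cons, List.sum_cons]
      rw [ih (x + y) j (by simpa using hj)]
      ring


lemma sums_pyGetD (bl : List (List Char)) (m : Int) (h0 : 0 ≤ m) (h1 : m.toNat ≤ bl.length) :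
    PySem.List.pyGetD (pvScan 0 (pvL bl)) m 0 = pvS bl m.toNat := by
  have hlen : (pvScan 0 (pvL bl)).length = bl.length + 1 := by
    rw [pvScan_len]; simp [pvL]
  have hm : m = ((m.toNat : Nat) : Int) := by omega
  rw [hm, PySem.List.pyGetD_natCast]
  rw [pvScan_getD (pvL bl) 0 m.toNat (by simp [pvL]; omega)]
  simp [pvS]
  congr 2
  omega


lemma pvS_mono (bl : List (List Char)) (a b : Nat) (hab : a ≤ b) (hb : b ≤ bl.length) :
    pvS bl a ≤ pvS bl b := by
  have hsplit : (pvL bl).take b = (pvL bl).take a ++ ((pvL bl).drop a).take (b - a) := by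
    rw [← List.take_add]
    congr 1
    omega
  have hnn : 0 ≤ (((pvL bl).drop a).take (b - a)).sum := by
    apply List.sum_nonneg
    intro x hx
    have hx2 : x ∈ pvL bl :=
      ((List.take_sublist _ _).trans (List.drop_sublist _ _)).subset hx
    simp only [pvL, List.mem_map] at hx2
    obtain ⟨b', _, rfl⟩ := hx2
    positivity
  simp only [pvS, hsplit, List.sum_append]
  omega


-- bullets characterizing the binary search result (fuel suffices when it covers the gap)
lemma pvFitLoop_bullets (sums : List Int) (base i : Int) :
    ∀ (fuel : Nat) (lo hi : Int), lo ≤ hi → (hi - lo).toNat ≤ fuel →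
      (pvFitLoop sums base i lo hi fuel = lo ∨
        base + PySem.List.pyGetD sums (pvFitLoop sums base i lo hi fuel) 0
          - PySem.List.pyGetD sums i 0 ≤ SAFE_LIMIT) ∧
      (pvFitLoop sums base i lo hi fuel = hi ∨
        ¬ (base + PySem.List.pyGetD sums (pvFitLoop sums base i lo hi fuel + 1) 0
          - PySem.List.pyGetD sums i 0 ≤ SAFE_LIMIT)) := by
  intro fuel
  induction fuel with
  | zero =>
    intro lo hi hle hfu
    have hx : lo = hi := by omega
    simp [pvFitLoop, hx]
  | succ fuel ih =>
    intro lo hi hle hfu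
    simp only [pvFitLoop]
    by_cases h1 : lo < hi
    · rw [if_pos h1]
      have hm : PySem.Int.floordiv (lo + hi + 1) 2 = (lo + hi + 1) / 2 :=
        PySem.Int.floordiv_eq_ediv_of_pos (by omega)
      by_cases h2 : base + PySem.List.pyGetD sums (PySem.Int.floordiv (lo + hi + 1) 2) 0
          - PySem.List.pyGetD sums i 0 ≤ SAFE_LIMIT
      · rw [if_pos h2]
        have := ih (PySem.Int.floordiv (lo + hi + 1) 2) hi (by omega) (by omega)
        refine ⟨Or.inr ?_, this.2⟩
        rcases this.1 with h3 | h3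
        · rw [h3]; exact h2
        · exact h3
      · rw [if_neg h2]
        have := ih lo (PySem.Int.floordiv (lo + hi + 1) 2 - 1) (by omega) (by omega)
        refine ⟨this.1, ?_⟩
        rcases this.2 with h3 | h3
        · right
          rw [h3]
          simpa using h2
        · exact Or.inr h3
    · rw [if_neg h1]
      exact ⟨Or.inl rfl, Or.inl (by omega)⟩

-- bullets characterizing A's greedy page end
lemma pvExt_bullets (base : Int) (bl : List (List Char)) (i : Nat) :
    ∀ j, j ≤ bl.length →
      pvExt base bl i j ≤ bl.length ∧
      (pvExt base bl i j = j ∨ pvCond base bl i (pvExt base bl i j) = true) ∧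
      (pvExt base bl i j = bl.length ∨ pvCond base bl i (pvExt base bl i j + 1) = false) := by
  intro j
  fun_induction pvExt base bl i j with
  | case1 j h ih =>
    intro _
    have := ih (by omega)
    refine ⟨this.1, ?_, this.2.2⟩
    rcases this.2.1 with h1 | h1
    · rw [h1]; exact Or.inr h.2
    · exact Or.inr h1
  | case2 j h =>
    intro hj
    rw [Decidable.not_and_iff_not_or_not] at h
    refine ⟨hj, Or.inl rfl, ?_⟩
    rcases h with h1 | h1
    · exact Or.inl (by omega)
    · exact Or.inr (by simpa using h1)


-- the binary search finds exactly A's greedy page end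
lemma fit_eq_ext (bl : List (List Char)) (base : Int) (i j : Nat) (fuel : Nat)
    (hij : i ≤ j) (hj : j ≤ bl.length) (hfu : bl.length - j ≤ fuel) :
    pvFitLoop (pvScan 0 (pvL bl)) base (i : Int) (j : Int) (bl.length : Int) fuel
      = ((pvExt base bl i j : Nat) : Int) := by
  set sums := pvScan 0 (pvL bl) with hsums
  set n := bl.length with hn
  have hjn : (j : Int) ≤ (n : Int) := by exact_mod_cast hj
  have hge := pvFitLoop_ge sums base (i : Int) fuel (j : Int) (n : Int)
  have hle := pvFitLoop_le sums base (i : Int) fuel (j : Int) (n : Int) hjn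
  have hbul := pvFitLoop_bullets sums base (i : Int) fuel (j : Int) (n : Int) hjn (by omega)
  set r1 : Int := pvFitLoop sums base (i : Int) (j : Int) (n : Int) fuel with hr1
  have hebul := pvExt_bullets base bl i j hj
  have hege := pvExt_ge base bl i j
  set r2 : Nat := pvExt base bl i j with hr2
  -- bridge the Int-level condition to pvCond
  have hbridge : ∀ m : Int, 0 ≤ m → m.toNat ≤ n →
      ((base + PySem.List.pyGetD sums m 0 - PySem.List.pyGetD sums (i : Int) 0 ≤ SAFE_LIMIT)
        ↔ pvCond base bl i m.toNat = true) := by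
    intro m hm0 hmn
    rw [hsums, sums_pyGetD bl m hm0 hmn, sums_pyGetD bl (i : Int) (by positivity) (by simp; omega)]
    simp [pvCond]
  have ha : r1 = ((r1.toNat : Nat) : Int) := by omega
  set a : Nat := r1.toNat with hadef
  have haj : j ≤ a := by omega
  have han : a ≤ n := by omega
  -- show a = r2 by trichotomy, using monotonicity of pvS
  have hmono : ∀ u v : Nat, u ≤ v → v ≤ n → pvCond base bl i v = true → pvCond base bl i u = true := by
    intro u v huv hvn hc
    simp only [pvCond, decide_eq_true_eq] at hc ⊢
    have := pvS_mono bl u v huv hvn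
    omega
  have : a = r2 := by
    rcases lt_trichotomy a r2 with hlt | heq | hgt
    · exfalso
      have h1 : r1 ≠ (n : Int) := by
        have : r2 ≤ n := hebul.1
        omega
      have h2 := hbul.2.resolve_left h1
      rw [show r1 + 1 = (((a + 1 : Nat) : Int)) by omega] at h2
      rw [hbridge ((a + 1 : Nat) : Int) (by positivity) (by simp; omega)] at h2
      simp at h2
      have h3 : pvCond base bl i r2 = true := by
        rcases hebul.2.1 with h | h
        · omega
        · exact h
      have := hmono (a + 1) r2 (by omega) hebul.1 h3
      simp [this] at h2
    · exact heq
    · exfalso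
      have h1 : r2 ≠ n := by omega
      have h2 := hebul.2.2.resolve_left h1
      have h3 : base + PySem.List.pyGetD sums r1 0 - PySem.List.pyGetD sums (i : Int) 0 ≤ SAFE_LIMIT := by
        rcases hbul.1 with h | h
        · omega
        · exact h
      rw [ha, hbridge ((a : Nat) : Int) (by positivity) (by simp; omega)] at h3
      simp at h3
      have := hmono (r2 + 1) a (by omega) han h3
      simp [this] at h2
  omega


lemma cutsLoop_run (bl : List (List Char)) (base : Int) :
    ∀ (fuel : Nat) (e : Nat) (pre : List Int), bl.length - e < fuel → e ≤ bl.length →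
      pre.getLastD 0 = (e : Int) →
      pvCutsLoop (pvScan 0 (pvL bl)) base (bl.length : Int) pre fuel
        = pre ++ (pvRest base bl e).map (fun x => (x : Int)) := by
  intro fuel
  induction fuel with
  | zero =>
    intro e pre hk he hlast
    omega
  | succ fuel ih =>
    intro e pre hk he hlast
    by_cases hlt : e < bl.length
    · rw [pvCutsLoop]
      rw [if_pos (by rw [hlast]; exact_mod_cast hlt)]
      have hfit : pvFitLoop (pvScan 0 (pvL bl)) base (pre.getLastD 0) (pre.getLastD 0 + 1)
            (bl.length : Int) (((bl.length : Int) - (pre.getLastD 0 + 1)).toNat + 1)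
          = ((pvExt base bl e (e + 1) : Nat) : Int) := by
        rw [hlast]
        rw [show ((e : Int) + 1) = ((e + 1 : Nat) : Int) by push_cast; ring]
        exact fit_eq_ext bl base e (e + 1) _ (by omega) (by omega) (by omega)
      rw [hfit]
      set e' : Nat := pvExt base bl e (e + 1) with he'
      have he'ge : e + 1 ≤ e' := pvExt_ge base bl e (e + 1)
      have he'le : e' ≤ bl.length := (pvExt_bullets base bl e (e + 1) (by omega)).1
      rw [ih e' (pre ++ [(e' : Int)]) (by omega) he'le (by simp)]
      conv_rhs => rw [pvRest, dif_pos hlt]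
      simp
      exact ⟨he', by rw [← he']⟩
    · rw [pvCutsLoop]
      rw [if_neg (by rw [hlast]; simp; omega)]
      rw [pvRest, dif_neg hlt]
      simp

lemma pages_chain (base : Int) (bl : List (List Char)) :
    ∀ (k : Nat) (i j : Nat), bl.length - j ≤ k → i ≤ j → j ≤ bl.length →
      pvPagesFrom base bl i j ++ [(pvLastStart base bl i j, bl.length)]
        = (i, pvExt base bl i j) :: pvChain base bl (pvExt base bl i j) := by
  intro k
  induction k with
  | zero =>
    intro i j hk hij hj
    have hjn : j = bl.length := by omega
    subst hjn
    rw [pvPagesFrom, dif_neg (by omega), pvLastStart, dif_neg (by omega),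
      pvExt, dif_neg (by simp), pvChain, dif_neg (by omega)]
    simp
  | succ k ih =>
    intro i j hk hij hj
    by_cases hlt : j < bl.length
    · by_cases hc : pvCond base bl i (j + 1) = true
      · rw [pvPagesFrom, dif_pos hlt, if_pos hc, pvLastStart, dif_pos hlt, if_pos hc,
          pvExt, dif_pos ⟨hlt, hc⟩]
        exact ih i (j + 1) (by omega) (by omega) (by omega)
      · rw [pvPagesFrom, dif_pos hlt, if_neg hc, pvLastStart, dif_pos hlt, if_neg hc,
          pvExt, dif_neg (by simp [hc])]
        have hrec := ih j (j + 1) (by omega) (by omega) (by omega)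
        rw [List.cons_append, hrec]
        conv_rhs => rw [pvChain, dif_pos hlt]
    · have hjn : j = bl.length := by omega
      subst hjn
      rw [pvPagesFrom, dif_neg (by omega), pvLastStart, dif_neg (by omega),
        pvExt, dif_neg (by simp), pvChain, dif_neg (by omega)]
      simp


lemma zip_rest (base : Int) (bl : List (List Char)) :
    ∀ (k : Nat) (e : Nat), bl.length - e ≤ k →
      (e :: pvRest base bl e).zip (pvRest base bl e) = pvChain base bl e := by
  intro k
  induction k with
  | zero =>
    intro e hk
    have hen : ¬ e < bl.length := by omega
    rw [pvRest, dif_neg hen, pvChain, dif_neg hen]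
    simp
  | succ k ih =>
    intro e hk
    by_cases hlt : e < bl.length
    · rw [pvRest, dif_pos hlt]
      set e' : Nat := pvExt base bl e (e + 1) with he'
      have he'ge : e + 1 ≤ e' := pvExt_ge base bl e (e + 1)
      have hz := ih e' (by omega)
      conv_rhs => rw [pvChain, dif_pos hlt]
      rw [List.zip_cons_cons, hz]
    · rw [pvRest, dif_neg hlt, pvChain, dif_neg hlt]
      simp



-- ===== VERDICT (by name: the statement is the Claim_ definition above) =====
theorem split_into_messages_spec : Claim_equal_split_into_messages := by
  intro blocks header _
  simp only [Spec_split_into_messages, split_into_messages, split_into_messages_alt]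
  set hh := PySem.Chars.strip header.toList with hhh
  set bl := blocks.map String.toList with hbl
  set base : Int := ((hh.length : Int) + 2) with hbase
  -- A side: run the loop invariant from the initial state
  have h00 : hh ++ pvNN = pvCur hh bl 0 0 := by simp [pvCur, pvFlat]
  have hA := foldA_run header bl bl.length 0 0 [] (by omega) (by omega) (by omega)
  rw [List.drop_zero] at hA
  rw [← hbase] at hA
  -- B side: the sums fold is pvScan
  have hsums : bl.foldl (fun s b => s ++ [s.getLastD 0 + ((b.length : Int) + 1)]) [(0 : Int)]
      = pvScan 0 (pvL bl) := by
    have h2 := pv_foldl_scan (pvL bl) [] 0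
    simp only [List.nil_append] at h2
    rw [← h2, pvL, hbl, List.map_map, List.foldl_map, List.foldl_map]
    simp [Function.comp]
  have hE0le : pvExt base bl 0 0 ≤ bl.length := (pvExt_bullets base bl 0 (0 : Nat) (Nat.zero_le _)).1
  have hfit0 : pvFitLoop (pvScan 0 (pvL bl)) base 0 0 (bl.length : Int) ((bl.length : Int).toNat + 1)
      = ((pvExt base bl 0 0 : Nat) : Int) := by
    have := fit_eq_ext bl base 0 0 ((bl.length : Int).toNat + 1) (le_refl 0) (Nat.zero_le _) (by omega)
    simpa using this
  have hcuts := cutsLoop_run bl base (bl.length + 1) (pvExt base bl 0 0)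
    [0, ((pvExt base bl 0 0 : Nat) : Int)] (by omega) hE0le (by simp)
  have hzip := zip_rest base bl bl.length (pvExt base bl 0 0) (by omega)
  have hchain := pages_chain base bl bl.length 0 0 (by omega) (le_refl 0) (Nat.zero_le _)
  rw [h00, hA, hsums, hfit0, hcuts]
  rw [← hhh]
  have hcN : [(0 : Int), ((pvExt base bl 0 0 : Nat) : Int)]
      ++ (pvRest base bl (pvExt base bl 0 0)).map (fun x => (x : Int))
      = (0 :: pvExt base bl 0 0 :: pvRest base bl (pvExt base bl 0 0)).map
          (fun x : Nat => (x : Int)) := by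
    simp
    exact List.map_eq_flatMap.symm
  rw [hcN]
  have htail : ((0 :: pvExt base bl 0 0 :: pvRest base bl (pvExt base bl 0 0)).map
        (fun x : Nat => (x : Int))).tail
      = ((pvExt base bl 0 0 :: pvRest base bl (pvExt base bl 0 0)).map
          (fun x : Nat => (x : Int))) := by
    simp
  rw [htail, List.zip_map]
  have hpairs : (0 :: pvExt base bl 0 0 :: pvRest base bl (pvExt base bl 0 0)).zip
        (pvExt base bl 0 0 :: pvRest base bl (pvExt base bl 0 0))
      = (0, pvExt base bl 0 0) :: pvChain base bl (pvExt base bl 0 0) := by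
    rw [List.zip_cons_cons, hzip]
  rw [hpairs, ← hchain]
  have hrender : ((pvPagesFrom base bl 0 0 ++ [(pvLastStart base bl 0 0, bl.length)]).map
        (Prod.map (fun x : Nat => (x : Int)) (fun x : Nat => (x : Int)))).map
        (fun ij => PySem.Chars.rstrip (pvCur hh bl 0 0 ++
          (List.map (fun b => b ++ ['\n']) (PySem.List.slice bl (some ij.1) (some ij.2))).flatten))
      = (pvPagesFrom base bl 0 0).map (fun p => PySem.Chars.rstrip (pvCur hh bl p.1 p.2))
        ++ [PySem.Chars.rstrip (pvCur hh bl (pvLastStart base bl 0 0) bl.length)] := by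
    rw [List.map_map]
    rw [show ((fun ij => PySem.Chars.rstrip (pvCur hh bl 0 0 ++
          (List.map (fun b => b ++ ['\n']) (PySem.List.slice bl (some ij.1) (some ij.2))).flatten))
        ∘ (Prod.map (fun x : Nat => (x : Int)) (fun x : Nat => (x : Int))))
        = (fun p : Nat × Nat => PySem.Chars.rstrip (pvCur hh bl p.1 p.2)) from ?_]
    · simp
    · funext p
      obtain ⟨a, b⟩ := p
      simp only [Function.comp_apply, Prod.map_apply]
      rw [← h00, PySem.List.slice_natCast]
      rfl
  rw [hrender]
  have hstr := pv_strip_nil_iff (pvCur hh bl (pvLastStart base bl 0 0) bl.length)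
  by_cases hmt : PySem.Chars.rstrip (pvCur hh bl (pvLastStart base bl 0 0) bl.length) = []
  · simp [hmt, hstr.mpr hmt]
  · have hne : ¬ PySem.Chars.strip (pvCur hh bl (pvLastStart base bl 0 0) bl.length) = [] :=
      fun hx => hmt (hstr.mp hx)
    simp [hmt, hne]
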